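-- pv_equiv track=rewrite | github.com/fuentesmarlon/Sodoku---15Puzzle | Problem.py | getFirstZero
-- ===== SOURCE A (Python) =====
-- def getFirstZero(board):
--     position=[]
--     count=0
--     for i in range(len(board)):
--         for j in board:
--             for value in j:
--                 if count==0:
--                     if value==0:
--                         position.append(board.index(j))
--                         position.append(j.index(value))
--                         count+=1
--     return position
-- ===== SOURCE B (Python) =====
-- def getFirstZero(board):
--     for row in board:
--         if 0 in row:
--             return [board.index(row), row.index(0)]
--     return []
-- ===== Notes on version B (the rewrite author's own statement) =====
-- stated objective: faster
-- what changed: Replaces the triple nested loop with a count sentinel (which rescans the whole board len(board) times) by a single early-return scan over rows using a membership test, keeping .index for duplicate-row fidelity.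
import Mathlib
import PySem

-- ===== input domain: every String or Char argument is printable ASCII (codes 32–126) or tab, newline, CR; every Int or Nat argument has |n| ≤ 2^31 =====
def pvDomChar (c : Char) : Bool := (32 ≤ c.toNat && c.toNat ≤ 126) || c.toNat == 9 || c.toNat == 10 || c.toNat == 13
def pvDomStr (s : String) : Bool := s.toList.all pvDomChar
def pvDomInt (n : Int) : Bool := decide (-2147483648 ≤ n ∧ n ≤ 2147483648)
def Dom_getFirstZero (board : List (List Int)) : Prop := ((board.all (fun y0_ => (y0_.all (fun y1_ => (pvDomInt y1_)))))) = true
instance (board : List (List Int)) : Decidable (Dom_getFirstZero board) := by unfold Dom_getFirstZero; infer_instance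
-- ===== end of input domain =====

-- B replaces A's triple nested loop with count sentinel by one early-return row scan (objective: simpler).


-- ===== PORT A =====
-- the 'for value in j' loop body: count guard, zero test, append board.index(j) and j.index(value), count += 1
def pvAStep (board : List (List Int)) (j : List Int) (st : List Int × Int) (v : Int) : List Int × Int :=
  if st.2 == 0 then
    if v == 0 then
      (st.1 ++ [(((PySem.List.index? board j).getD 0 : Nat) : Int),
                (((PySem.List.index? j v).getD 0 : Nat) : Int)], st.2 + 1)
    else st
  else st

def getFirstZero (board : List (List Int)) : List Int :=
  ((PySem.List.pyRange 0 board.length 1).foldl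
    (fun st _ => board.foldl (fun st j => j.foldl (pvAStep board j) st) st) ([], 0)).1

-- ===== PORT B =====
def pvBGo (board : List (List Int)) : List (List Int) → List Int
  | [] => []
  | row :: rest =>
    if (0 : Int) ∈ row then
      [(((PySem.List.index? board row).getD 0 : Nat) : Int),
       (((PySem.List.index? row 0).getD 0 : Nat) : Int)]
    else pvBGo board rest

def getFirstZero_alt (board : List (List Int)) : List Int := pvBGo board board

-- ===== PRECONDITION & SPEC =====
def Spec_getFirstZero (board : List (List Int)) (out : List Int) : Prop := out = getFirstZero_alt board
instance (board : List (List Int)) (out : List Int) : Decidable (Spec_getFirstZero board out) := by unfold Spec_getFirstZero; infer_instance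

-- ===== CLAIM (what is proved, stated in full; the proofs are below) =====
def Claim_equal_getFirstZero : Prop := ∀ (board : List (List Int)), Dom_getFirstZero board → Spec_getFirstZero board (getFirstZero board)

-- ===== LEMMAS AND PROOFS =====

-- once count ≠ 0, the value loop is the identity
theorem pvFold_frozen (board : List (List Int)) (j : List Int) (vs : List Int)
    (st : List Int × Int) (h : st.2 ≠ 0) : vs.foldl (pvAStep board j) st = st := by
  induction vs with
  | nil => rfl
  | cons v vs ih =>
    simp only [List.foldl]
    rw [show pvAStep board j st v = st from by simp [pvAStep, h]]
    exact ih

-- value loop from count 0: appends the pair iff a zero occurs among the values scanned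
theorem pvFold_zero (board : List (List Int)) (j : List Int) (vs : List Int) (pos : List Int) :
    vs.foldl (pvAStep board j) (pos, 0) =
      if (0 : Int) ∈ vs then
        (pos ++ [(((PySem.List.index? board j).getD 0 : Nat) : Int),
                 (((PySem.List.index? j 0).getD 0 : Nat) : Int)], 1)
      else (pos, 0) := by
  induction vs with
  | nil => simp
  | cons v vs ih =>
    by_cases hv : v = 0
    · subst hv
      simp only [List.foldl]
      rw [show pvAStep board j (pos, 0) 0 =
            (pos ++ [(((PySem.List.index? board j).getD 0 : Nat) : Int),
                     (((PySem.List.index? j 0).getD 0 : Nat) : Int)], 1) from by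
            simp [pvAStep]]
      rw [pvFold_frozen board j vs _ (by simp)]
      simp
    · simp only [List.foldl]
      rw [show pvAStep board j (pos, 0) v = (pos, 0) from by simp [pvAStep, hv]]
      rw [ih]
      have h0 : ¬ ((0:Int) = v) := fun h => hv h.symm
      simp [List.mem_cons, h0]

-- whole-board pass from count ≠ 0 is the identity
theorem pvBoard_frozen (board l : List (List Int)) (st : List Int × Int) (h : st.2 ≠ 0) :
    l.foldl (fun st j => j.foldl (pvAStep board j) st) st = st := by
  induction l with
  | nil => rfl
  | cons j js ih =>
    simp only [List.foldl]
    rw [pvFold_frozen board j j st h]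
    exact ih

-- one board pass from (pos, 0): appends B's result, flag records whether a zero exists
theorem pvBoard_pass (board l : List (List Int)) (pos : List Int) :
    l.foldl (fun st j => j.foldl (pvAStep board j) st) (pos, 0) =
      (pos ++ pvBGo board l, if l.any (fun r => decide ((0:Int) ∈ r)) then 1 else 0) := by
  induction l generalizing pos with
  | nil => simp [pvBGo]
  | cons row rest ih =>
    simp only [List.foldl]
    rw [pvFold_zero board row row pos]
    by_cases h : (0 : Int) ∈ row
    · rw [if_pos h, pvBoard_frozen board rest _ (by simp)]
      simp [pvBGo, h]
    · rw [if_neg h, ih]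
      simp [pvBGo, h]

-- a fold that applies a fixed point repeatedly stays put
theorem pvFoldl_fix {α β : Type} (F : α → α) (l : List β) (s : α) (h : F s = s) :
    l.foldl (fun st _ => F st) s = s := by
  induction l with
  | nil => rfl
  | cons _ _ ih => simp only [List.foldl, h]; exact ih

-- no zero anywhere ⇒ B returns []
theorem pvBGo_nil_of_no_zero (board l : List (List Int))
    (h : l.any (fun r => decide ((0:Int) ∈ r)) = false) : pvBGo board l = [] := by
  induction l with
  | nil => rfl
  | cons row rest ih =>
    simp only [List.any_cons, Bool.or_eq_false_iff] at h
    simp [pvBGo, of_decide_eq_false h.1, ih h.2]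

-- the first range iteration computes B's answer; later iterations are fixed-point applications
theorem pvRangeFold (board : List (List Int)) (a : Int) (l : List Int) :
    ((a :: l).foldl (fun st (_ : Int) =>
        board.foldl (fun st j => j.foldl (pvAStep board j) st) st) ([], 0)).1
      = pvBGo board board := by
  simp only [List.foldl_cons]
  rw [pvBoard_pass board board []]
  rw [pvFoldl_fix _ _ _ ?_]
  · simp
  · by_cases h : (board.any (fun r => decide ((0:Int) ∈ r)))
    · rw [if_pos h]
      exact pvBoard_frozen board board _ (by simp)
    · have hz := pvBGo_nil_of_no_zero board board (by simpa using h)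
      rw [if_neg h]
      simp only [hz, List.append_nil]
      rw [pvBoard_pass board board []]
      simp [hz, h]

theorem getFirstZero_eq_alt (board : List (List Int)) :
    getFirstZero board = getFirstZero_alt board := by
  unfold getFirstZero getFirstZero_alt
  cases board with
  | nil => rfl
  | cons r rs =>
    rw [PySem.List.pyRange_one_cons (by simp)]
    exact pvRangeFold (r :: rs) 0 _

-- ===== VERDICT (by name: the statement is the Claim_ definition above) =====
theorem getFirstZero_spec : Claim_equal_getFirstZero := by
  intro board _
  exact getFirstZero_eq_alt board
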